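-- pv_equiv track=rewrite | github.com/SeoulChonnom/stockapp | app/batch/steps/build_clusters.py | _derive_tags
-- ===== SOURCE A (Python) =====
-- def _derive_tags(titles: list[str]) -> list[str]:
--     tokens: list[str] = []
--     for title in titles:
--         for token in title.replace('/', ' ').replace('|', ' ').split():
--             cleaned = token.strip()
--             if len(cleaned) < 2:
--                 continue
--             if cleaned not in tokens:
--                 tokens.append(cleaned)
--             if len(tokens) >= 5:
--                 return tokens
--     return tokens
-- ===== SOURCE B (Python) =====
-- def _derive_tags(titles: list[str]) -> list[str]:
--     stream = [tok.strip() for title in titles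
--               for tok in title.replace('/', ' ').replace('|', ' ').split()]
--     first = {}
--     for pos, t in enumerate(stream):
--         if len(t) >= 2:
--             first.setdefault(t, pos)
--     return [t for t, _ in sorted(first.items(), key=lambda kv: kv[1])][:5]
-- ===== Notes on version B (the rewrite author's own statement) =====
-- stated objective: alternative
-- what changed: B is an offline position-index algorithm: it flattens the titles into one token stream, records each long-enough token's first-occurrence position in a dict via setdefault, then sorts the (token, position) entries by position and slices the first five tokens, instead of A's online nested loops that append unseen tokens into the result list, test its length after each append, and early-return from inside the inner loop.
import Mathlib
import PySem

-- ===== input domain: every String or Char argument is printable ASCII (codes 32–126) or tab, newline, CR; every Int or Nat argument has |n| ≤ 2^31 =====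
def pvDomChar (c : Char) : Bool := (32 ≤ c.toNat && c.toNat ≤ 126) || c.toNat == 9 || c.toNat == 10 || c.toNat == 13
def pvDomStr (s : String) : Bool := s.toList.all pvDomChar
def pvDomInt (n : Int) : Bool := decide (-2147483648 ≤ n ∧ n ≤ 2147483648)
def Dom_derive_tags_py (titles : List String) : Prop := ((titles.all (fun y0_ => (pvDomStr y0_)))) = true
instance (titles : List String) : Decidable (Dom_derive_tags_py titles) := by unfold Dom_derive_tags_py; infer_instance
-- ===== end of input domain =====

-- B is an offline algorithm: it flattens the titles into one token stream, records each long-enough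
-- token's FIRST position in a dict, then sorts the entries by that position and truncates to 5
-- (alternative to A's online accumulate-until-5 nested loops with early return).

-- ===== PORT A =====
-- inner loop over one title's tokens; the Bool flag = "the early `return tokens` fired"
def pvAInner (tokens : List String) : List String → List String × Bool
  | [] => (tokens, false)
  | tok :: rest =>
    let cleaned := PySem.Str.strip tok
    if PySem.Str.len cleaned < 2 then pvAInner tokens rest
    else
      let tokens' := if tokens.contains cleaned then tokens else tokens ++ [cleaned]
      if 5 ≤ tokens'.length then (tokens', true) else pvAInner tokens' rest

def pvALoop (tokens : List String) : List String → List String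
  | [] => tokens
  | title :: rest =>
    match pvAInner tokens
        (PySem.Str.split₀ (PySem.Str.replace (PySem.Str.replace title "/" " ") "|" " ")) with
    | (tokens', true) => tokens'
    | (tokens', false) => pvALoop tokens' rest

def derive_tags_py (titles : List String) : List String := pvALoop [] titles

-- ===== PORT B =====
def derive_tags_py_alt (titles : List String) : List String :=
  let stream := titles.flatMap (fun title =>
    (PySem.Str.split₀ (PySem.Str.replace (PySem.Str.replace title "/" " ") "|" " ")).map
      PySem.Str.strip)
  let first := (PySem.List.enumerate stream 0).foldl
    (fun d p => if 2 ≤ PySem.Str.len p.2 then d.setdefault p.2 p.1 else d)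
    (PySem.Dict.empty : PySem.Dict String Int)
  PySem.List.slice
    ((PySem.List.sorted first.items (fun kv => kv.2) false).map (fun kv => kv.1)) none (some 5)

-- ===== PRECONDITION & SPEC =====
def Spec_derive_tags_py (titles : List String) (out : List String) : Prop := out = derive_tags_py_alt titles
instance (titles : List String) (out : List String) : Decidable (Spec_derive_tags_py titles out) := by unfold Spec_derive_tags_py; infer_instance

-- ===== CLAIM (what is proved, stated in full; the proofs are below) =====
def Claim_equal_derive_tags_py : Prop := ∀ (titles : List String), Dom_derive_tags_py titles → Spec_derive_tags_py titles (derive_tags_py titles)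

-- ===== LEMMAS AND PROOFS =====

-- proof-only: the early-return-free dedup accumulation over one title's raw tokens
def pvDD (acc : List String) (toks : List String) : List String :=
  toks.foldl (fun acc tok =>
    let c := PySem.Str.strip tok
    if 2 ≤ PySem.Str.len c then PySem.Set.add acc c else acc) acc

def pvClean (title : String) : List String :=
  PySem.Str.split₀ (PySem.Str.replace (PySem.Str.replace title "/" " ") "|" " ")

def pvDDAll (acc : List String) (titles : List String) : List String :=
  titles.foldl (fun acc title => pvDD acc (pvClean title)) acc

theorem pvDD_cons (acc : List String) (tok : String) (rest : List String) :
    pvDD acc (tok :: rest) =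
      pvDD (if 2 ≤ PySem.Str.len (PySem.Str.strip tok)
              then PySem.Set.add acc (PySem.Str.strip tok) else acc) rest := by
  simp only [pvDD, List.foldl_cons]

theorem pvUpdate_cons {α : Type} [BEq α] (s : PySem.Set α) (x : α) (l : List α) :
    PySem.Set.update s (x :: l) = PySem.Set.update (PySem.Set.add s x) l := by
  simp only [PySem.Set.update, List.foldl_cons]

theorem pvUpdate_append {α : Type} [BEq α] (s : PySem.Set α) (l₁ l₂ : List α) :
    PySem.Set.update s (l₁ ++ l₂) = PySem.Set.update (PySem.Set.update s l₁) l₂ := by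
  unfold PySem.Set.update; rw [List.foldl_append]

theorem pvAdd_prefix (s : List String) (c : String) : s <+: PySem.Set.add s c := by
  unfold PySem.Set.add; split
  · exact List.prefix_refl _
  · exact ⟨[c], rfl⟩

theorem pvDD_prefix (toks : List String) : ∀ acc : List String, acc <+: pvDD acc toks := by
  induction toks with
  | nil => intro acc; exact List.prefix_refl _
  | cons tok rest ih =>
    intro acc
    rw [pvDD_cons]
    refine List.IsPrefix.trans ?_ (ih _)
    split
    · exact pvAdd_prefix acc _
    · exact List.prefix_refl _

theorem pvDDAll_cons (acc : List String) (t : String) (rest : List String) :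
    pvDDAll acc (t :: rest) = pvDDAll (pvDD acc (pvClean t)) rest := by
  simp only [pvDDAll, List.foldl_cons]

theorem pvDDAll_prefix (titles : List String) : ∀ acc : List String, acc <+: pvDDAll acc titles := by
  induction titles with
  | nil => intro acc; exact List.prefix_refl _
  | cons t rest ih =>
    intro acc
    rw [pvDDAll_cons]
    exact List.IsPrefix.trans (pvDD_prefix _ acc) (ih (pvDD acc (pvClean t)))

theorem pvDD_eq (toks : List String) : ∀ acc : List String,
    pvDD acc toks =
      PySem.Set.update acc
        ((toks.map PySem.Str.strip).filter (fun t => 2 ≤ PySem.Str.len t)) := by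
  induction toks with
  | nil =>
    intro acc
    simp only [pvDD, List.foldl_nil, List.map_nil, List.filter_nil, PySem.Set.update]
  | cons tok rest ih =>
    intro acc
    rw [pvDD_cons, List.map_cons, List.filter_cons]
    by_cases hp : 2 ≤ PySem.Str.len (PySem.Str.strip tok)
    · rw [if_pos hp, if_pos (by exact decide_eq_true hp), pvUpdate_cons, ih]
    · rw [if_neg hp, if_neg (by simpa using hp), ih]

theorem pvAInner_nil (tokens : List String) : pvAInner tokens [] = (tokens, false) := by
  simp only [pvAInner]

theorem pvAInner_cons (tokens : List String) (tok : String) (rest : List String) :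
    pvAInner tokens (tok :: rest) =
      (if PySem.Str.len (PySem.Str.strip tok) < 2 then pvAInner tokens rest
       else
         if 5 ≤ (if tokens.contains (PySem.Str.strip tok) then tokens
                 else tokens ++ [PySem.Str.strip tok]).length then
           ((if tokens.contains (PySem.Str.strip tok) then tokens
             else tokens ++ [PySem.Str.strip tok]), true)
         else pvAInner (if tokens.contains (PySem.Str.strip tok) then tokens
                        else tokens ++ [PySem.Str.strip tok]) rest) := by
  simp only [pvAInner]

theorem pvAdd_eq_contains (tokens : List String) (c : String) :
    PySem.Set.add tokens c = (if tokens.contains c then tokens else tokens ++ [c]) := by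
  simp only [PySem.Set.add, PySem.Set.contains]; rfl

theorem pvAInner_spec (toks : List String) : ∀ (tokens tokens' : List String) (flag : Bool),
    tokens.length < 5 → pvAInner tokens toks = (tokens', flag) →
    (flag = true → tokens'.length = 5 ∧ tokens' <+: pvDD tokens toks) ∧
    (flag = false → tokens' = pvDD tokens toks ∧ tokens'.length < 5) := by
  induction toks with
  | nil =>
    intro tokens tokens' flag h heq
    rw [pvAInner_nil] at heq
    injection heq with h1 h2
    subst h1; subst h2
    refine ⟨fun hf => absurd hf (by decide), fun _ => ⟨?_, h⟩⟩
    simp only [pvDD, List.foldl_nil]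
  | cons tok rest ih =>
    intro tokens tokens' flag h heq
    rw [pvAInner_cons] at heq
    rw [pvDD_cons]
    by_cases hc : PySem.Str.len (PySem.Str.strip tok) < 2
    · rw [if_pos hc] at heq
      rw [if_neg (by omega : ¬ 2 ≤ PySem.Str.len (PySem.Str.strip tok))]
      exact ih tokens tokens' flag h heq
    · rw [if_neg hc] at heq
      rw [if_pos (by omega : 2 ≤ PySem.Str.len (PySem.Str.strip tok)), pvAdd_eq_contains]
      have hlen' : (if tokens.contains (PySem.Str.strip tok) then tokens
          else tokens ++ [PySem.Str.strip tok]).length ≤ tokens.length + 1 := by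
        split
        · omega
        · simp
      by_cases h5 : 5 ≤ (if tokens.contains (PySem.Str.strip tok) then tokens
          else tokens ++ [PySem.Str.strip tok]).length
      · rw [if_pos h5] at heq
        cases heq
        refine ⟨fun _ => ⟨by omega, pvDD_prefix rest _⟩, fun hf => absurd hf (by decide)⟩
      · rw [if_neg h5] at heq
        exact ih _ tokens' flag (by omega) heq

theorem pvALoop_cons (tokens : List String) (title : String) (rest : List String) :
    pvALoop tokens (title :: rest) =
      (match pvAInner tokens (pvClean title) with
       | (tokens', true) => tokens'
       | (tokens', false) => pvALoop tokens' rest) := by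
  simp only [pvALoop, pvClean]

theorem pvALoop_spec (titles : List String) : ∀ tokens : List String, tokens.length < 5 →
    pvALoop tokens titles = (pvDDAll tokens titles).take 5 := by
  induction titles with
  | nil =>
    intro tokens h
    rw [show pvALoop tokens [] = tokens from rfl, show pvDDAll tokens [] = tokens from rfl,
      List.take_of_length_le (by omega : tokens.length ≤ 5)]
  | cons title rest ih =>
    intro tokens h
    rw [pvALoop_cons, pvDDAll_cons]
    rcases hres : pvAInner tokens (pvClean title) with ⟨tokens', flag⟩
    have hspec := pvAInner_spec (pvClean title) tokens tokens' flag h hres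
    cases flag with
    | false =>
      obtain ⟨heq, hlt⟩ := hspec.2 rfl
      show pvALoop tokens' rest = (pvDDAll (pvDD tokens (pvClean title)) rest).take 5
      rw [ih tokens' hlt, heq]
    | true =>
      obtain ⟨hlen, hpre⟩ := hspec.1 rfl
      show tokens' = (pvDDAll (pvDD tokens (pvClean title)) rest).take 5
      have hpre2 : tokens' <+: pvDDAll (pvDD tokens (pvClean title)) rest :=
        List.IsPrefix.trans hpre (pvDDAll_prefix rest _)
      obtain ⟨s, hs⟩ := hpre2
      rw [← hs, ← hlen, List.take_left]

theorem pvDDAll_eq (titles : List String) : ∀ acc : List String,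
    pvDDAll acc titles =
      PySem.Set.update acc
        ((titles.flatMap (fun title => (pvClean title).map PySem.Str.strip)).filter
          (fun t => 2 ≤ PySem.Str.len t)) := by
  induction titles with
  | nil =>
    intro acc
    simp only [pvDDAll, List.foldl_nil, List.flatMap_nil, List.filter_nil, PySem.Set.update]
  | cons t rest ih =>
    intro acc
    rw [pvDDAll_cons, List.flatMap_cons, List.filter_append, pvUpdate_append, ← pvDD_eq, ih]

-- B's dict fold: keys are exactly Set.update of the filtered token stream
def pvBFold (d : PySem.Dict String Int) (l : List (Int × String)) : PySem.Dict String Int :=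
  l.foldl (fun d p => if 2 ≤ PySem.Str.len p.2 then d.setdefault p.2 p.1 else d) d

theorem pvBFold_cons (d : PySem.Dict String Int) (p : Int × String) (l : List (Int × String)) :
    pvBFold d (p :: l) =
      pvBFold (if 2 ≤ PySem.Str.len p.2 then d.setdefault p.2 p.1 else d) l := by
  simp only [pvBFold, List.foldl_cons]

theorem pvBFold_keys (l : List (Int × String)) : ∀ d : PySem.Dict String Int,
    (pvBFold d l).keys =
      PySem.Set.update d.keys ((l.map (·.2)).filter (fun t => 2 ≤ PySem.Str.len t)) := by
  induction l with
  | nil => intro d; simp [pvBFold, PySem.Set.update]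
  | cons p rest ih =>
    intro d
    rw [pvBFold_cons, List.map_cons, List.filter_cons]
    by_cases hl : 2 ≤ PySem.Str.len p.2
    · rw [if_pos hl, if_pos (by exact decide_eq_true hl), pvUpdate_cons, ih]
      congr 1
      by_cases hc : d.contains p.2
      · rw [PySem.Dict.setdefault_of_contains _ _ hc, pvAdd_eq_contains, if_pos]
        rw [List.contains_iff_mem]
        exact (PySem.Dict.contains_iff_mem_keys _ _).1 hc
      · rw [PySem.Dict.setdefault_of_not_contains _ _ (by simpa using hc),
          PySem.Dict.keys_insert_of_not_contains _ _ (by simpa using hc),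
          pvAdd_eq_contains, if_neg]
        rw [List.contains_iff_mem]
        exact fun hm => hc ((PySem.Dict.contains_iff_mem_keys _ _).2 hm)
    · rw [if_neg hl, if_neg (by simpa using hl), ih]

-- B's dict fold: the stored positions are strictly increasing in insertion order
theorem pvBFold_values (l : List (Int × String)) : ∀ d : PySem.Dict String Int,
    l.Pairwise (fun p q => p.1 < q.1) →
    (∀ v ∈ d.values, ∀ p ∈ l, v < p.1) →
    d.values.Pairwise (· < ·) →
    (pvBFold d l).values.Pairwise (· < ·) := by
  induction l with
  | nil => intro d _ _ hd; simpa [pvBFold] using hd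
  | cons p rest ih =>
    intro d hpl hvl hd
    rw [pvBFold_cons]
    have hpl' := (List.pairwise_cons.1 hpl).2
    have hphd := (List.pairwise_cons.1 hpl).1
    by_cases hl : 2 ≤ PySem.Str.len p.2
    · rw [if_pos hl]
      by_cases hc : d.contains p.2
      · rw [PySem.Dict.setdefault_of_contains _ _ hc]
        exact ih d hpl' (fun v hv q hq => hvl v hv q (List.mem_cons_of_mem _ hq)) hd
      · rw [PySem.Dict.setdefault_of_not_contains _ _ (by simpa using hc)]
        have hvals : (d.insert p.2 p.1).values = d.values ++ [p.1] := by
          simp only [PySem.Dict.values,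
            PySem.Dict.items_insert_of_not_contains _ _ (by simpa using hc), List.map_append,
            List.map_cons, List.map_nil]
        refine ih _ hpl' ?_ ?_
        · intro v hv q hq
          rw [hvals] at hv
          rcases List.mem_append.1 hv with hv | hv
          · exact hvl v hv q (List.mem_cons_of_mem _ hq)
          · rcases List.mem_singleton.1 hv with rfl
            exact hphd q hq
        · rw [hvals]
          refine List.pairwise_append.2 ⟨hd, List.pairwise_singleton _ _, ?_⟩
          intro v hv w hw
          rcases List.mem_singleton.1 hw with rfl
          exact hvl v hv p (List.mem_cons_self)
    · rw [if_neg hl]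
      exact ih d hpl' (fun v hv q hq => hvl v hv q (List.mem_cons_of_mem _ hq)) hd

-- with strictly increasing positions the stable sort by position is the identity
theorem pvSorted_items (d : PySem.Dict String Int) (h : d.values.Pairwise (· < ·)) :
    PySem.List.sorted d.items (fun kv => kv.2) false = d.items := by
  refine PySem.List.sorted_eq_of_perm_of_pairwise_lt _ _ _ (List.Perm.refl _) ?_
  have : d.values = d.items.map (·.2) := rfl
  rw [this, List.pairwise_map] at h
  exact h

-- ===== VERDICT (by name: the statement is the Claim_ definition above) =====
theorem derive_tags_py_spec : Claim_equal_derive_tags_py := by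
  intro titles _
  unfold Spec_derive_tags_py derive_tags_py derive_tags_py_alt
  have hvals := pvBFold_values (PySem.List.enumerate (titles.flatMap (fun title =>
      (PySem.Str.split₀ (PySem.Str.replace (PySem.Str.replace title "/" " ") "|" " ")).map
        PySem.Str.strip)) 0) PySem.Dict.empty
    (PySem.List.pairwise_lt_enumerate _ _)
    (by intro v hv; simp [PySem.Dict.empty, PySem.Dict.values] at hv)
    (by simp [PySem.Dict.empty, PySem.Dict.values])
  show pvALoop [] titles = _
  rw [pvALoop_spec titles [] (by simp), pvDDAll_eq titles []]
  show _ = PySem.List.slice ((PySem.List.sorted (pvBFold PySem.Dict.empty _).items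
      (fun kv => kv.2) false).map (fun kv => kv.1)) none (some 5)
  rw [pvSorted_items _ hvals,
    show ((pvBFold PySem.Dict.empty (PySem.List.enumerate _ 0)).items.map (fun kv => kv.1)) =
      (pvBFold PySem.Dict.empty (PySem.List.enumerate (titles.flatMap (fun title =>
        (PySem.Str.split₀ (PySem.Str.replace (PySem.Str.replace title "/" " ") "|" " ")).map
          PySem.Str.strip)) 0)).keys from rfl,
    pvBFold_keys, PySem.List.map_snd_enumerate,
    PySem.List.slice_to _ (by norm_num : (0:Int) ≤ 5)]
  simp only [pvClean, PySem.Dict.empty, PySem.Dict.keys]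
  rfl
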